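-- pv_equiv track=rewrite | github.com/simple0710/BOJ | silver/[20310] 타노스.py | solution
-- ===== SOURCE A (Python) =====
-- def solution(string):
--   zero_cnt = string.count('0') // 2
--   one_cnt = string.count('1') // 2
--   res = ''
--   for i in string:
--     # 0을 먼저 절반만큼 추가한다.
--     if i == '0' and zero_cnt:
--       zero_cnt -= 1
--       res += i
--     elif i == '1': # 1은 나중에 추가한다.
--       if one_cnt: # 절반의 횟수를 넘긴다.
--         one_cnt -= 1
--       else: # 절반 이후엔 정답에 추가한다.
--         res += i
--   return res # 문자열 반환
-- ===== SOURCE B (Python) =====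
-- def solution(string):
--     zeros = [i for i, c in enumerate(string) if c == '0']
--     ones = [i for i, c in enumerate(string) if c == '1']
--     keep = set(zeros[:len(zeros) // 2] + ones[len(ones) // 2:])
--     return ''.join(c for i, c in enumerate(string) if i in keep)
-- ===== Notes on version B (the rewrite author's own statement) =====
-- stated objective: alternative
-- what changed: Replaces A's single stateful scan with decrementing budget counters by an index-based decomposition: build the position lists of '0's and '1's, keep the first half of the zero positions and the last half of the one positions as a set, and filter the string by index membership.
import Mathlib
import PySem

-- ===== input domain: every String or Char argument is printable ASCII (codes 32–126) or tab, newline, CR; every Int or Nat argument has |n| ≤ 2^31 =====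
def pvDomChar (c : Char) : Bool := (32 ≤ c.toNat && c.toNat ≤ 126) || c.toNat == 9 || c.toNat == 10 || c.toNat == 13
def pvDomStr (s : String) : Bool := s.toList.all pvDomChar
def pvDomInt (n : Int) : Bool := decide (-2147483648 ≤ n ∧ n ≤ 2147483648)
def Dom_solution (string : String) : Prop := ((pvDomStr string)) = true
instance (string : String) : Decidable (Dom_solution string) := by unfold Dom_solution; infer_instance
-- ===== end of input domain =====

-- B replaces A's budget-counter scan by an index-list decomposition (keep-set of positions); alternative structure, same cost.


-- ===== PORT A =====
def solution (string : String) : String :=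
  let zero_cnt : Int := PySem.Int.floordiv (PySem.Str.count string "0" : Int) 2
  let one_cnt : Int := PySem.Int.floordiv (PySem.Str.count string "1" : Int) 2
  let st := string.toList.foldl (fun (st : Int × Int × List Char) i =>
      if i = '0' ∧ st.1 ≠ 0 then (st.1 - 1, st.2.1, st.2.2 ++ [i])
      else if i = '1' then
        (if st.2.1 ≠ 0 then (st.1, st.2.1 - 1, st.2.2) else (st.1, st.2.1, st.2.2 ++ [i]))
      else st) (zero_cnt, one_cnt, ([] : List Char))
  String.ofList st.2.2

-- ===== PORT B =====
def solution_alt (string : String) : String :=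
  let l := string.toList
  let zeros := ((PySem.List.enumerate l).filter (fun p => p.2 == '0')).map Prod.fst
  let ones := ((PySem.List.enumerate l).filter (fun p => p.2 == '1')).map Prod.fst
  let keep : PySem.Set Int := PySem.Set.ofList
      (PySem.List.slice zeros none (some (PySem.Int.floordiv (PySem.List.len zeros) 2))
        ++ PySem.List.slice ones (some (PySem.Int.floordiv (PySem.List.len ones) 2)) none)
  String.ofList (((PySem.List.enumerate l).filter (fun p => keep.contains p.1)).map Prod.snd)

-- ===== PRECONDITION & SPEC =====
def Spec_solution (string : String) (out : String) : Prop := out = solution_alt string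
instance (string : String) (out : String) : Decidable (Spec_solution string out) := by unfold Spec_solution; infer_instance

-- ===== CLAIM (what is proved, stated in full; the proofs are below) =====
def Claim_equal_solution : Prop := ∀ (string : String), Dom_solution string → Spec_solution string (solution string)

-- ===== LEMMAS AND PROOFS =====

-- common characterisation: scan with remaining Nat budgets z (zeros still to keep) and o (ones still to skip)
def pvF (l : List Char) (z o : Nat) : List Char :=
  match l with
  | [] => []
  | c :: t =>
    if c = '0' then (if z ≠ 0 then c :: pvF t (z - 1) o else pvF t z o)
    else if c = '1' then (if o ≠ 0 then pvF t z (o - 1) else c :: pvF t z o)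
    else pvF t z o

-- ---- count bridge: single-character substring count is List.count ----
theorem pv_go_singleton (c : Char) : ∀ (fuel : Nat) (s : List Char) (acc : Nat), s.length ≤ fuel →
    PySem.Chars.count.go [c] fuel s acc = acc + s.count c := by
  intro fuel
  induction fuel with
  | zero =>
    intro s acc h
    cases s with
    | nil => simp [PySem.Chars.count.go]
    | cons x t => simp at h
  | succ n ih =>
    intro s acc h
    cases s with
    | nil => simp [PySem.Chars.count.go]
    | cons x t =>
      simp only [PySem.Chars.count.go, List.isPrefixOf, List.count_cons]
      by_cases hx : x = c
      · subst hx
        simp [ih t (acc + 1) (by simpa using h)]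
        omega
      · simp [hx, Ne.symm hx, ih t acc (by simpa using h)]

theorem pv_count_singleton (s : List Char) (c : Char) :
    PySem.Chars.count s [c] = s.count c := by
  simp [PySem.Chars.count, pv_go_singleton c s.length s 0 le_rfl]

-- ---- A's fold equals pvF ----
def pvStep (st : Int × Int × List Char) (i : Char) : Int × Int × List Char :=
  if i = '0' ∧ st.1 ≠ 0 then (st.1 - 1, st.2.1, st.2.2 ++ [i])
  else if i = '1' then
    (if st.2.1 ≠ 0 then (st.1, st.2.1 - 1, st.2.2) else (st.1, st.2.1, st.2.2 ++ [i]))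
  else st

theorem pv_foldA : ∀ (l : List Char) (z o : Nat) (acc : List Char),
    (l.foldl pvStep ((z : Int), (o : Int), acc)).2.2 = acc ++ pvF l z o := by
  intro l
  induction l with
  | nil => intro z o acc; simp [pvF]
  | cons c t ih =>
    intro z o acc
    simp only [List.foldl_cons, pvF]
    by_cases h0 : c = '0'
    · subst h0
      by_cases hz : z = 0
      · subst hz
        have h := ih 0 o acc
        simp only [Nat.cast_zero] at h
        simp [pvStep, h]
      · have hcast : ((z : Int)) - 1 = ((z - 1 : Nat) : Int) := by
          push_cast [Nat.cast_sub (Nat.one_le_iff_ne_zero.mpr hz)]; ring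
        have h := ih (z - 1) o (acc ++ ['0'])
        have hzi : ((z : Int)) ≠ 0 := by exact_mod_cast hz
        simp only [pvStep]
        simp only [hcast] at h ⊢
        simp [hz, h]
    · by_cases h1 : c = '1'
      · subst h1
        by_cases ho : o = 0
        · subst ho
          have h := ih z 0 (acc ++ ['1'])
          simp only [Nat.cast_zero] at h
          simp [pvStep, h0, h]
        · have hcast : ((o : Int)) - 1 = ((o - 1 : Nat) : Int) := by
            push_cast [Nat.cast_sub (Nat.one_le_iff_ne_zero.mpr ho)]; ring
          have hoi : ((o : Int)) ≠ 0 := by exact_mod_cast ho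
          have h := ih z (o - 1) acc
          simp only [pvStep, h0, if_pos hoi]
          simp only [hcast] at *
          simp [ho, h]
      · simp [pvStep, h0, h1, ih z o acc]

-- ---- position lists ----
def pvPos (c : Char) (l : List Char) (s : Int) : List Int :=
  ((PySem.List.enumerate l s).filter (fun p => p.2 == c)).map Prod.fst

theorem pvPos_cons (c x : Char) (t : List Char) (s : Int) :
    pvPos c (x :: t) s = (if x = c then [s] else []) ++ pvPos c t (s + 1) := by
  simp [pvPos, PySem.List.enumerate_cons]
  split_ifs with h <;> simp [h]

theorem pvPos_append (c : Char) (xs ys : List Char) (s : Int) :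
    pvPos c (xs ++ ys) s = pvPos c xs s ++ pvPos c ys (s + xs.length) := by
  simp [pvPos, PySem.List.enumerate_append]

theorem length_pvPos (c : Char) (l : List Char) (s : Int) :
    (pvPos c l s).length = l.count c := by
  induction l generalizing s with
  | nil => simp [pvPos]
  | cons x t ih => rw [pvPos_cons]; by_cases h : x = c <;> simp [h, ih]

theorem mem_pvPos_bounds (c : Char) (l : List Char) (s : Int) :
    ∀ x ∈ pvPos c l s, s ≤ x ∧ x < s + l.length := by
  induction l generalizing s with
  | nil => simp [pvPos]
  | cons y t ih =>
    intro x hx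
    rw [pvPos_cons] at hx
    rcases List.mem_append.mp hx with h | h
    · split_ifs at h <;> simp_all <;> omega
    · have := ih (s + 1) x h; simp; omega

theorem mem_take_pvPos (c x : Char) (pre t : List Char) (m : Nat) :
    ((pre.length : Int) ∈ (pvPos c (pre ++ x :: t) 0).take m) ↔ (x = c ∧ pre.count c < m) := by
  rw [pvPos_append, pvPos_cons, List.take_append]
  have hu : ∀ y ∈ pvPos c pre 0, y < (pre.length : Int) := by
    intro y hy; have := mem_pvPos_bounds c pre 0 y hy; omega
  have hw : ∀ y ∈ pvPos c t ((pre.length : Int) + 1), (pre.length : Int) < y := by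
    intro y hy; have := mem_pvPos_bounds c t _ y hy; omega
  have hk : (pvPos c pre 0).length = pre.count c := length_pvPos c pre 0
  have hnotu : (pre.length : Int) ∉ (pvPos c pre 0).take m := by
    intro hmem; exact absurd (hu _ (List.mem_of_mem_take hmem)) (by omega)
  by_cases hx : x = c
  · simp only [hx, if_pos rfl, if_true, List.singleton_append, zero_add, eq_self_iff_true, true_and]
    constructor
    · intro hmem
      by_contra hm
      rcases List.mem_append.mp hmem with h | h
      · exact hnotu h
      · have hms : m - (pvPos c pre 0).length = 0 := by omega
        simp [hms] at h
    · intro hm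
      apply List.mem_append.mpr; right
      obtain ⟨j, hj⟩ : ∃ j, m - (pvPos c pre 0).length = j + 1 := ⟨m - (pvPos c pre 0).length - 1, by omega⟩
      rw [hj, List.take_succ_cons]
      exact List.mem_cons_self
  · simp only [hx, if_false, List.nil_append, zero_add]
    constructor
    · intro hmem
      rcases List.mem_append.mp hmem with h | h
      · exact absurd h hnotu
      · exact absurd (hw _ (List.mem_of_mem_take h)) (lt_irrefl _)
    · rintro ⟨h, _⟩; exact h.elim

theorem mem_drop_pvPos (c x : Char) (pre t : List Char) (m : Nat) :
    ((pre.length : Int) ∈ (pvPos c (pre ++ x :: t) 0).drop m) ↔ (x = c ∧ m ≤ pre.count c) := by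
  rw [pvPos_append, pvPos_cons, List.drop_append]
  have hu : ∀ y ∈ pvPos c pre 0, y < (pre.length : Int) := by
    intro y hy; have := mem_pvPos_bounds c pre 0 y hy; omega
  have hw : ∀ y ∈ pvPos c t ((pre.length : Int) + 1), (pre.length : Int) < y := by
    intro y hy; have := mem_pvPos_bounds c t _ y hy; omega
  have hk : (pvPos c pre 0).length = pre.count c := length_pvPos c pre 0
  have hnotu : (pre.length : Int) ∉ (pvPos c pre 0).drop m := by
    intro hmem; exact absurd (hu _ (List.mem_of_mem_drop hmem)) (by omega)
  by_cases hx : x = c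
  · simp only [hx, if_pos rfl, if_true, List.singleton_append, zero_add, eq_self_iff_true, true_and]
    constructor
    · intro hmem
      by_contra hm
      rcases List.mem_append.mp hmem with h | h
      · exact hnotu h
      · obtain ⟨j, hj⟩ : ∃ j, m - (pvPos c pre 0).length = j + 1 :=
          ⟨m - (pvPos c pre 0).length - 1, by omega⟩
        rw [hj, List.drop_succ_cons] at h
        exact absurd (hw _ (List.mem_of_mem_drop h)) (lt_irrefl _)
    · intro hm
      apply List.mem_append.mpr; right
      have hms : m - (pvPos c pre 0).length = 0 := by omega
      rw [hms, List.drop_zero]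
      exact List.mem_cons_self
  · simp only [hx, if_false, List.nil_append, zero_add]
    constructor
    · intro hmem
      rcases List.mem_append.mp hmem with h | h
      · exact absurd h hnotu
      · exact absurd (hw _ (List.mem_of_mem_drop h)) (lt_irrefl _)
    · rintro ⟨h, _⟩; exact h.elim

-- ---- B's filter equals pvF ----
theorem pvMain (l : List Char) : ∀ (t pre : List Char), l = pre ++ t →
    ((PySem.List.enumerate t (pre.length : Int)).filter
        (fun p => decide (p.1 ∈ (pvPos '0' l 0).take (l.count '0' / 2)
          ++ (pvPos '1' l 0).drop (l.count '1' / 2)))).map Prod.snd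
      = pvF t (l.count '0' / 2 - pre.count '0') (l.count '1' / 2 - pre.count '1') := by
  intro t
  induction t with
  | nil => intro pre h; simp [PySem.List.enumerate_nil, pvF]
  | cons x t' ih =>
    intro pre h
    have hcast : ((pre ++ [x]).length : Int) = (pre.length : Int) + 1 := by
      simp
    have hrec := ih (pre ++ [x]) (by simpa using h)
    rw [hcast] at hrec
    have h0 : ((pre.length : Int) ∈ (pvPos '0' l 0).take (l.count '0' / 2)) ↔
        (x = '0' ∧ pre.count '0' < l.count '0' / 2) := by
      rw [h]; exact mem_take_pvPos '0' x pre t' _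
    have h1 : ((pre.length : Int) ∈ (pvPos '1' l 0).drop (l.count '1' / 2)) ↔
        (x = '1' ∧ l.count '1' / 2 ≤ pre.count '1') := by
      rw [h]; exact mem_drop_pvPos '1' x pre t' _
    simp only [PySem.List.enumerate_cons, List.filter_cons]
    by_cases hx0 : x = '0'
    · subst hx0
      by_cases hz : pre.count '0' < l.count '0' / 2
      · have hmem : ((pre.length : Int) ∈ (pvPos '0' l 0).take (l.count '0' / 2)
            ++ (pvPos '1' l 0).drop (l.count '1' / 2)) := List.mem_append.mpr (Or.inl (h0.mpr ⟨rfl, hz⟩))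
        rw [if_pos (by simpa using hmem)]
        simp only [List.map_cons, hrec, pvF]
        have e1 : l.count '0' / 2 - (pre ++ ['0']).count '0' = (l.count '0' / 2 - pre.count '0') - 1 := by
          simp [List.count_append]; omega
        have e2 : l.count '1' / 2 - (pre ++ ['0']).count '1' = l.count '1' / 2 - pre.count '1' := by
          simp [List.count_append]
        rw [e1, e2] at *
        simp [show (l.count '0' / 2 - pre.count '0') ≠ 0 by omega]
      · have hmem : ((pre.length : Int) ∉ (pvPos '0' l 0).take (l.count '0' / 2)
            ++ (pvPos '1' l 0).drop (l.count '1' / 2)) := by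
          intro hm
          rcases List.mem_append.mp hm with hh | hh
          · exact hz (h0.mp hh).2
          · exact absurd (h1.mp hh).1 (by decide)
        rw [if_neg (by simpa using hmem)]
        rw [hrec]
        have e1 : l.count '0' / 2 - (pre ++ ['0']).count '0' = l.count '0' / 2 - pre.count '0' := by
          simp [List.count_append]; omega
        have e2 : l.count '1' / 2 - (pre ++ ['0']).count '1' = l.count '1' / 2 - pre.count '1' := by
          simp [List.count_append]
        rw [e1, e2]
        simp [pvF, show l.count '0' / 2 - pre.count '0' = 0 by omega]
    · by_cases hx1 : x = '1'
      · subst hx1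
        by_cases ho : l.count '1' / 2 ≤ pre.count '1'
        · have hmem : ((pre.length : Int) ∈ (pvPos '0' l 0).take (l.count '0' / 2)
              ++ (pvPos '1' l 0).drop (l.count '1' / 2)) := List.mem_append.mpr (Or.inr (h1.mpr ⟨rfl, ho⟩))
          rw [if_pos (by simpa using hmem)]
          simp only [List.map_cons, hrec, pvF]
          have e1 : l.count '0' / 2 - (pre ++ ['1']).count '0' = l.count '0' / 2 - pre.count '0' := by
            simp [List.count_append]
          have e2 : l.count '1' / 2 - (pre ++ ['1']).count '1' = l.count '1' / 2 - pre.count '1' := by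
            simp [List.count_append]; omega
          rw [e1, e2] at *
          simp [show l.count '1' / 2 - pre.count '1' = 0 by omega]
        · have hmem : ((pre.length : Int) ∉ (pvPos '0' l 0).take (l.count '0' / 2)
              ++ (pvPos '1' l 0).drop (l.count '1' / 2)) := by
            intro hm
            rcases List.mem_append.mp hm with hh | hh
            · exact absurd (h0.mp hh).1 (by decide)
            · exact ho (h1.mp hh).2
          rw [if_neg (by simpa using hmem)]
          rw [hrec]
          have e1 : l.count '0' / 2 - (pre ++ ['1']).count '0' = l.count '0' / 2 - pre.count '0' := by
            simp [List.count_append]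
          have e2 : l.count '1' / 2 - (pre ++ ['1']).count '1' = (l.count '1' / 2 - pre.count '1') - 1 := by
            simp [List.count_append]; omega
          rw [e1, e2]
          simp [pvF, show l.count '1' / 2 - pre.count '1' ≠ 0 by omega]
      · have hmem : ((pre.length : Int) ∉ (pvPos '0' l 0).take (l.count '0' / 2)
            ++ (pvPos '1' l 0).drop (l.count '1' / 2)) := by
          intro hm
          rcases List.mem_append.mp hm with hh | hh
          · exact hx0 (h0.mp hh).1
          · exact hx1 (h1.mp hh).1
        rw [if_neg (by simpa using hmem)]
        rw [hrec]
        have e1 : l.count '0' / 2 - (pre ++ [x]).count '0' = l.count '0' / 2 - pre.count '0' := by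
          simp [List.count_append, hx0]
        have e2 : l.count '1' / 2 - (pre ++ [x]).count '1' = l.count '1' / 2 - pre.count '1' := by
          simp [List.count_append, hx1]
        rw [e1, e2]
        simp [pvF, hx0, hx1]

-- ---- assembly ----
theorem pv_contains_ofList (L : List Int) (x : Int) :
    (PySem.Set.ofList L).contains x = decide (x ∈ L) := by
  by_cases hx : x ∈ L
  · simp [hx, PySem.Set.contains_iff, PySem.Set.mem_ofList]
  · simp only [hx, decide_false]
    by_contra hb
    have : (PySem.Set.ofList L).contains x = true := by
      cases h : (PySem.Set.ofList L).contains x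
      · exact absurd h hb
      · rfl
    exact hx ((PySem.Set.mem_ofList L x).mp ((PySem.Set.contains_iff _ _).mp this))

theorem pv_solution_eq (s : String) :
    solution s = String.ofList (pvF s.toList (s.toList.count '0' / 2) (s.toList.count '1' / 2)) := by
  have c0 : (PySem.Str.count s "0" : Int) = ((s.toList.count '0' : Nat) : Int) := by
    rw [PySem.Str.count_eq]
    norm_cast
    exact pv_count_singleton s.toList '0'
  have c1 : (PySem.Str.count s "1" : Int) = ((s.toList.count '1' : Nat) : Int) := by
    rw [PySem.Str.count_eq]
    norm_cast
    exact pv_count_singleton s.toList '1'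
  show String.ofList (s.toList.foldl _ (_, _, ([] : List Char))).2.2 = _
  rw [show (fun (st : Int × Int × List Char) i =>
      if i = '0' ∧ st.1 ≠ 0 then (st.1 - 1, st.2.1, st.2.2 ++ [i])
      else if i = '1' then
        (if st.2.1 ≠ 0 then (st.1, st.2.1 - 1, st.2.2) else (st.1, st.2.1, st.2.2 ++ [i]))
      else st) = pvStep from rfl]
  rw [c0, c1]
  rw [show PySem.Int.floordiv ((s.toList.count '0' : Nat) : Int) 2 = (((s.toList.count '0' / 2 : Nat)) : Int) from by
    exact_mod_cast PySem.Int.floordiv_natCast (s.toList.count '0') 2]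
  rw [show PySem.Int.floordiv ((s.toList.count '1' : Nat) : Int) 2 = (((s.toList.count '1' / 2 : Nat)) : Int) from by
    exact_mod_cast PySem.Int.floordiv_natCast (s.toList.count '1') 2]
  rw [pv_foldA s.toList _ _ []]
  simp

theorem pv_solution_alt_eq (s : String) :
    solution_alt s = String.ofList (pvF s.toList (s.toList.count '0' / 2) (s.toList.count '1' / 2)) := by
  show String.ofList _ = _
  have hz : ((PySem.List.enumerate s.toList).filter (fun p => p.2 == '0')).map Prod.fst = pvPos '0' s.toList 0 := rfl
  have ho : ((PySem.List.enumerate s.toList).filter (fun p => p.2 == '1')).map Prod.fst = pvPos '1' s.toList 0 := rfl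
  rw [hz, ho]
  have flen0 : PySem.Int.floordiv (PySem.List.len (pvPos '0' s.toList 0)) 2
      = (((s.toList.count '0' / 2 : Nat)) : Int) := by
    rw [show PySem.List.len (pvPos '0' s.toList 0) = ((pvPos '0' s.toList 0).length : Int) from PySem.List.len_eq _,
      length_pvPos]
    exact_mod_cast PySem.Int.floordiv_natCast (s.toList.count '0') 2
  have flen1 : PySem.Int.floordiv (PySem.List.len (pvPos '1' s.toList 0)) 2
      = (((s.toList.count '1' / 2 : Nat)) : Int) := by
    rw [show PySem.List.len (pvPos '1' s.toList 0) = ((pvPos '1' s.toList 0).length : Int) from PySem.List.len_eq _,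
      length_pvPos]
    exact_mod_cast PySem.Int.floordiv_natCast (s.toList.count '1') 2
  rw [flen0, flen1, PySem.List.slice_to_natCast, PySem.List.slice_from_natCast]
  rw [List.filter_congr (fun p _ => pv_contains_ofList _ p.1)]
  have := pvMain s.toList s.toList [] rfl
  simp only [List.length_nil, Nat.cast_zero, List.count_nil, Nat.sub_zero] at this
  rw [this]

-- ===== VERDICT (by name: the statement is the Claim_ definition above) =====
theorem solution_spec : Claim_equal_solution := by
  intro s _
  unfold Spec_solution
  rw [pv_solution_eq, pv_solution_alt_eq]
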